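-- pv_equiv track=rewrite | github.com/chaytanc/crypto_net | docs/data_processor.py | get_auto_k
-- ===== SOURCE A (Python) =====
-- def get_auto_k(slopes):
-- 	# Most negative slope, one that reduces error most is where k is
-- 	#NOTE k will be 0 if min_slope is not updated
-- 	min_slope = [-1, 100000000000000000000000000]
-- 	# Need to iterate double to get full sort
-- 	#NOTE this finna take a WHILE for a fat dataset like mine. Just show
-- 	# elbow graph instead lowkey
-- 	for each in slopes:
-- 		for also_each in slopes:
-- 			if also_each[1] < min_slope[1]:
-- 				min_slope[0] = also_each[0]
-- 				min_slope[1] = also_each[1]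
-- 	# Need to add one because it is the cluster at x2, y2, not the i of x, y
-- 	k = min_slope[0] + 1
-- 	return k
-- ===== SOURCE B (Python) =====
-- def get_auto_k(slopes):
--     # Stable sort by the slope value: the head is the first entry with the most
--     # negative slope; +1 converts its stored index of (x, y) to the cluster
--     # count at (x2, y2).
--     ordered = sorted(slopes, key=lambda s: s[1])
--     return ordered[0][0] + 1
-- ===== Notes on version B (the rewrite author's own statement) =====
-- stated objective: alternative
-- what changed: Replaces A's redundant O(n^2) nested sentinel scan by a sort-then-take-head strategy: a stable sort keyed on the slope value (stability preserves A's strict-< first-occurrence tie rule), returning the head's stored index + 1.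
-- outside the precondition, e.g. on get_auto_k([]): A returns 0, B raises IndexError; on get_auto_k([[0]]): A raises IndexError, B raises IndexError
import Mathlib
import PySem

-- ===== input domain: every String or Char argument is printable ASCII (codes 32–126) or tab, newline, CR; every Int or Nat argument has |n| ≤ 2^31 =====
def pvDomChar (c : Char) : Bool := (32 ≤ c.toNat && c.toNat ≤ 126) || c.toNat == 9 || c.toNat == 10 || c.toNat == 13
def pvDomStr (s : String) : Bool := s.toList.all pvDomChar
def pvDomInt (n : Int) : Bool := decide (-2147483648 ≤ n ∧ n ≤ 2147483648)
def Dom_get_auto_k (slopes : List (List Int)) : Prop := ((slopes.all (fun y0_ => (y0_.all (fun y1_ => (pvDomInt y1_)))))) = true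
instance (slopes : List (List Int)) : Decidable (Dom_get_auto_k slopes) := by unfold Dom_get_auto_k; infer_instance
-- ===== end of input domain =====

-- B replaces A's redundant quadratic nested sentinel scan by a stable sort keyed
-- on the slope value followed by taking the head; objective: alternative algorithm.


-- ===== PORT A =====
-- also_each[1] / also_each[0] as total accessors (Python raises when absent;
-- Pre_ excludes those inputs, so the getD 0 default is never the value used)
def pvKey (l : List Int) : Int := (PySem.List.pyGet? l 1).getD 0
def pvFst (l : List Int) : Int := (PySem.List.pyGet? l 0).getD 0

def get_auto_k (slopes : List (List Int)) : Int :=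
  -- min_slope = [-1, 10^26]; double loop updating on strict <
  let min_slope :=
    slopes.foldl (fun ms _ =>
      slopes.foldl (fun ms ae =>
        if pvKey ae < ms.2 then (pvFst ae, pvKey ae) else ms) ms)
      ((-1 : Int), (100000000000000000000000000 : Int))
  min_slope.1 + 1

-- ===== PORT B =====
-- ordered = sorted(slopes, key=lambda s: s[1]); return ordered[0][0] + 1
def get_auto_k_alt (slopes : List (List Int)) : Int :=
  let ordered := PySem.List.sorted slopes pvKey
  match PySem.List.pyGet? ordered 0 with
  | some m => pvFst m + 1
  | none => 0   -- unreachable under Pre_ (Python B raises IndexError on [])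

-- ===== PRECONDITION & SPEC =====
-- Pre_ excludes the empty list, on which A's 0 is its sentinel -1 + 1 while B's
-- ordered[0] raises IndexError, and the rows of length < 2 on which both Pythons
-- raise IndexError.
def Pre_get_auto_k (slopes : List (List Int)) : Prop :=
  slopes ≠ [] ∧ ∀ l ∈ slopes, 2 ≤ l.length
instance (slopes : List (List Int)) : Decidable (Pre_get_auto_k slopes) := by
  unfold Pre_get_auto_k; infer_instance
def pvWitness_get_auto_k : List (List Int) := [[0, -5], [1, 3]]
def Spec_get_auto_k (slopes : List (List Int)) (out : Int) : Prop := out = get_auto_k_alt slopes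
instance (slopes : List (List Int)) (out : Int) : Decidable (Spec_get_auto_k slopes out) := by unfold Spec_get_auto_k; infer_instance

-- ===== CLAIM (what is proved, stated in full; the proofs are below) =====
def Claim_equal_get_auto_k : Prop := ∀ (slopes : List (List Int)), Dom_get_auto_k slopes → Pre_get_auto_k slopes → Spec_get_auto_k slopes (get_auto_k slopes)

-- ===== LEMMAS AND PROOFS =====

-- A's inner loop step, and the plain first-strict-min fold
def pvStep (ms : Int × Int) (ae : List Int) : Int × Int :=
  if pvKey ae < ms.2 then (pvFst ae, pvKey ae) else ms
def pvMinFold (m : List Int) (t : List (List Int)) : List Int :=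
  t.foldl (fun m x => if pvKey x < pvKey m then x else m) m

theorem pvMinFold_cons (m x : List Int) (t : List (List Int)) :
    pvMinFold m (x :: t) = pvMinFold (if pvKey x < pvKey m then x else m) t := rfl

theorem inner_from_elem (t : List (List Int)) (m : List Int) :
    t.foldl pvStep (pvFst m, pvKey m) = (pvFst (pvMinFold m t), pvKey (pvMinFold m t)) := by
  induction t generalizing m with
  | nil => rfl
  | cons x t ih =>
      simp only [List.foldl, pvStep, pvMinFold]
      by_cases h : pvKey x < pvKey m <;> simp [h, ih, pvMinFold]

theorem minFold_isMin (t : List (List Int)) (m : List Int) :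
    pvKey (pvMinFold m t) ≤ pvKey m ∧ ∀ y ∈ t, pvKey (pvMinFold m t) ≤ pvKey y := by
  induction t generalizing m with
  | nil => exact ⟨le_refl _, by simp⟩
  | cons x t ih =>
      simp only [pvMinFold_cons]
      by_cases h : pvKey x < pvKey m
      · rw [if_pos h]
        refine ⟨le_trans (ih x).1 (le_of_lt h), ?_⟩
        intro y hy
        rcases List.mem_cons.mp hy with hy' | hy
        · rw [hy']; exact (ih x).1
        · exact (ih x).2 y hy
      · rw [if_neg h]
        refine ⟨(ih m).1, ?_⟩
        intro y hy
        rcases List.mem_cons.mp hy with hy' | hy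
        · rw [hy']; exact le_trans (ih m).1 (le_of_not_gt h)
        · exact (ih m).2 y hy

theorem inner_noop (xs : List (List Int)) (ms : Int × Int)
    (h : ∀ y ∈ xs, ms.2 ≤ pvKey y) : xs.foldl pvStep ms = ms := by
  induction xs with
  | nil => rfl
  | cons x t ih =>
      have hx : ¬ pvKey x < ms.2 := not_lt.mpr (h x (List.mem_cons_self ..))
      simp only [List.foldl, pvStep, hx, if_false]
      exact ih (fun y hy => h y (List.mem_cons_of_mem _ hy))

theorem foldl_const_of_fix {α β : Type} (f : α → α) (a : α) (l : List β)
    (h : f a = a) : l.foldl (fun a _ => f a) a = a := by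
  induction l with
  | nil => rfl
  | cons x t ih => simpa [List.foldl, h] using ih

theorem key_lt_big (l : List Int) (hd : l.all (fun y => pvDomInt y) = true) :
    pvKey l < 100000000000000000000000000 := by
  unfold pvKey
  cases hg : PySem.List.pyGet? l 1 with
  | none => norm_num
  | some v =>
      have hv : v ∈ l := by
        unfold PySem.List.pyGet? at hg
        cases hi : PySem.List.pyIdx? l.length 1 with
        | none => simp [hi] at hg
        | some k =>
            simp only [hi, Option.bind_some] at hg
            exact List.mem_of_getElem? hg
      have := List.all_eq_true.mp hd v hv
      simp only [pvDomInt, decide_eq_true_eq] at this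
      simp only [Option.getD_some]
      omega

-- insertBy on a nonempty list: the head becomes x exactly when key x < key head
theorem insertBy_cons (bef : List Int → List Int → Bool) (x h : List Int) (t : List (List Int)) :
    PySem.List.insertBy bef x (h :: t)
      = if bef x h then x :: h :: t else h :: PySem.List.insertBy bef x t := rfl

-- the head of the insertion-sort fold over a nonempty accumulator is the
-- first strict minimum (A's update rule)
theorem head_foldl_insertBy (xs : List (List Int)) :
    ∀ (h : List Int) (rest : List (List Int)), ∃ rest',
      xs.foldl (fun acc x => PySem.List.insertBy (fun a b => decide (pvKey a < pvKey b)) x acc)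
        (h :: rest) = pvMinFold h xs :: rest' := by
  induction xs with
  | nil => intro h rest; exact ⟨rest, rfl⟩
  | cons x t ih =>
      intro h rest
      rw [List.foldl_cons, insertBy_cons, pvMinFold_cons]
      by_cases hc : pvKey x < pvKey h
      · simp only [hc, decide_true, if_true]
        exact ih x (h :: rest)
      · simp only [hc, decide_false, if_false]
        exact ih h (PySem.List.insertBy (fun a b => decide (pvKey a < pvKey b)) x rest)

-- head of sorted (x :: t) keyed by pvKey is the first strict minimum
theorem sorted_head (x : List Int) (t : List (List Int)) :
    ∃ rest', PySem.List.sorted (x :: t) pvKey = pvMinFold x t :: rest' := by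
  rw [PySem.List.sorted_eq_foldl_insertBy, List.foldl_cons]
  exact head_foldl_insertBy t x []

-- ===== VERDICT (by name: the statement is the Claim_ definition above) =====
theorem get_auto_k_spec : Claim_equal_get_auto_k := by
  intro slopes hdom hpre
  unfold Spec_get_auto_k
  obtain ⟨hne, -⟩ := hpre
  cases slopes with
  | nil => exact absurd rfl hne
  | cons x t =>
      have hdom' : ∀ l ∈ x :: t, l.all (fun y => pvDomInt y) = true := by
        intro l hl
        exact List.all_eq_true.mp hdom l hl
      -- the inner loop (once) from the sentinel
      have hfirst :
          (x :: t).foldl pvStep ((-1 : Int), (100000000000000000000000000 : Int))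
            = (pvFst (pvMinFold x t), pvKey (pvMinFold x t)) := by
        have hx : pvKey x < 100000000000000000000000000 :=
          key_lt_big x (hdom' x (List.mem_cons_self ..))
        simp only [List.foldl, pvStep, hx, if_pos]
        exact inner_from_elem t x
      -- it is a fixed point of the inner loop
      have hfix :
          (x :: t).foldl pvStep (pvFst (pvMinFold x t), pvKey (pvMinFold x t))
            = (pvFst (pvMinFold x t), pvKey (pvMinFold x t)) := by
        apply inner_noop
        intro y hy
        rcases List.mem_cons.mp hy with hy' | hy
        · rw [hy']; exact (minFold_isMin t x).1
        · exact (minFold_isMin t x).2 y hy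
      -- A's result
      have hA : get_auto_k (x :: t) = pvFst (pvMinFold x t) + 1 := by
        unfold get_auto_k
        show (List.foldl (fun ms (_ : List Int) => List.foldl pvStep ms (x :: t))
          ((-1 : Int), (100000000000000000000000000 : Int)) (x :: t)).1 + 1 = _
        rw [List.foldl_cons, hfirst,
          foldl_const_of_fix (fun ms => List.foldl pvStep ms (x :: t)) _ t hfix]
      -- B's result
      have hB : get_auto_k_alt (x :: t) = pvFst (pvMinFold x t) + 1 := by
        unfold get_auto_k_alt
        obtain ⟨rest', hs⟩ := sorted_head x t
        simp [hs, PySem.List.pyGet?, PySem.List.pyIdx?]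
      rw [hA, hB]
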